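-- pv_equiv track=rewrite | github.com/signalnine/tildebin | scripts/k8s/pv_health.py | parse_storage_quantity
-- ===== SOURCE A (Python) =====
-- def parse_storage_quantity(quantity_str: str) -> int:
--     """Parse Kubernetes storage quantity string to bytes."""
--     if not quantity_str:
--         return 0
--
--     units = {
--         'Ki': 1024,
--         'Mi': 1024**2,
--         'Gi': 1024**3,
--         'Ti': 1024**4,
--         'Pi': 1024**5,
--         'K': 1000,
--         'M': 1000**2,
--         'G': 1000**3,
--         'T': 1000**4,
--         'P': 1000**5,
--     }
--
--     for suffix, multiplier in sorted(units.items(), key=lambda x: len(x[0]), reverse=True):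
--         if quantity_str.endswith(suffix):
--             try:
--                 return int(quantity_str[:-len(suffix)]) * multiplier
--             except ValueError:
--                 return 0
--
--     try:
--         return int(quantity_str)
--     except ValueError:
--         return 0
-- ===== SOURCE B (Python) =====
-- def parse_storage_quantity(quantity_str: str) -> int:
--     """Parse Kubernetes storage quantity string to bytes."""
--     if not quantity_str:
--         return 0
--
--     units = {
--         'Ki': 1024,
--         'Mi': 1024**2,
--         'Gi': 1024**3,
--         'Ti': 1024**4,
--         'Pi': 1024**5,
--         'K': 1000,
--         'M': 1000**2,
--         'G': 1000**3,
--         'T': 1000**4,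
--         'P': 1000**5,
--     }
--
--     tail2 = quantity_str[-2:]
--     tail1 = quantity_str[-1:]
--     if tail2 in units:
--         mult, num = units[tail2], quantity_str[:-2]
--     elif tail1 in units:
--         mult, num = units[tail1], quantity_str[:-1]
--     else:
--         mult, num = 1, quantity_str
--
--     try:
--         return int(num) * mult
--     except ValueError:
--         return 0
-- ===== Notes on version B (the rewrite author's own statement) =====
-- stated objective: idiomatic
-- what changed: B drops the sort-then-endswith loop over unit suffixes: it slices the last two and last one characters and looks each up in the units dict directly, then does a single int() conversion of the chosen numeric part.
import Mathlib
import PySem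

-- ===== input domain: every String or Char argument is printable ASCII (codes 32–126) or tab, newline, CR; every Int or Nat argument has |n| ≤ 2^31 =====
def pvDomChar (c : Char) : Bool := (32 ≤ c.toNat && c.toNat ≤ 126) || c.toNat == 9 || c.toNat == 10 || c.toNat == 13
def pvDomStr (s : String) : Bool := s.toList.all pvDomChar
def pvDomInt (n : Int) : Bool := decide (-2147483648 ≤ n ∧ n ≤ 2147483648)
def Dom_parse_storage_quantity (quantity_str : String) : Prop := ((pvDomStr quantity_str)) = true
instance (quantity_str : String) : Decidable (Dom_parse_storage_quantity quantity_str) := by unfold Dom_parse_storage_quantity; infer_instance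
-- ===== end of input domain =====

-- B replaces A's sorted-endswith suffix loop by direct dict lookups of the last-two/last-one character slices; same return value on every input.

-- ===== PORT A =====
-- port of A: dict of units, loop over sorted(items, key=len, reverse=True) taking the first endswith match
def pvUnitsA : PySem.Dict String Int :=
  PySem.Dict.ofList [("Ki", 1024), ("Mi", 1024^2), ("Gi", 1024^3), ("Ti", 1024^4), ("Pi", 1024^5),
    ("K", 1000), ("M", 1000^2), ("G", 1000^3), ("T", 1000^4), ("P", 1000^5)]

-- the for-loop body: first suffix with quantity_str.endswith(suffix) returns; after the loop, int(quantity_str)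
def pvLoopA (q : String) : List (String × Int) → Int
  | [] =>
    match PySem.Int.ofStr? q with
    | some n => n
    | none => 0
  | (suffix, multiplier) :: rest =>
    if PySem.Str.endswith q suffix then
      match PySem.Int.ofStr? (PySem.Str.slice q none (some (-(PySem.Str.len suffix)))) with
      | some n => n * multiplier
      | none => 0
    else pvLoopA q rest

def parse_storage_quantity (quantity_str : String) : Int :=
  if quantity_str = "" then 0
  else
    pvLoopA quantity_str
      (PySem.List.sorted pvUnitsA.items (fun x => PySem.Str.len x.1) true)

-- ===== PORT B =====
def pvUnitsB : PySem.Dict String Int :=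
  PySem.Dict.ofList [("Ki", 1024), ("Mi", 1024^2), ("Gi", 1024^3), ("Ti", 1024^4), ("Pi", 1024^5),
    ("K", 1000), ("M", 1000^2), ("G", 1000^3), ("T", 1000^4), ("P", 1000^5)]

-- B: look the last two / last one characters up in the dict directly; single int() at the end
def parse_storage_quantity_alt (quantity_str : String) : Int :=
  if quantity_str = "" then 0
  else
    let tail2 := PySem.Str.slice quantity_str (some (-2)) none
    let tail1 := PySem.Str.slice quantity_str (some (-1)) none
    let p : Int × String :=
      match pvUnitsB.get? tail2 with
      | some m => (m, PySem.Str.slice quantity_str none (some (-2)))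
      | none =>
        match pvUnitsB.get? tail1 with
        | some m => (m, PySem.Str.slice quantity_str none (some (-1)))
        | none => (1, quantity_str)
    match PySem.Int.ofStr? p.2 with
    | some n => n * p.1
    | none => 0

-- ===== PRECONDITION & SPEC =====
def Spec_parse_storage_quantity (quantity_str : String) (out : Int) : Prop := out = parse_storage_quantity_alt quantity_str
instance (quantity_str : String) (out : Int) : Decidable (Spec_parse_storage_quantity quantity_str out) := by unfold Spec_parse_storage_quantity; infer_instance

-- ===== CLAIM (what is proved, stated in full; the proofs are below) =====
def Claim_equal_parse_storage_quantity : Prop := ∀ (quantity_str : String), Dom_parse_storage_quantity quantity_str → Spec_parse_storage_quantity quantity_str (parse_storage_quantity quantity_str)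

-- ===== LEMMAS AND PROOFS =====
lemma pvEw2 (l : List Char) (b c x y : Char) :
    PySem.Chars.endswith (l ++ [b, c]) [x, y] = (y == c && x == b) := by
  simp [PySem.Chars.endswith, List.isSuffixOf, List.isPrefixOf]
lemma pvEw2s (c x y : Char) : PySem.Chars.endswith [c] [x, y] = false := by
  simp [PySem.Chars.endswith, List.isSuffixOf, List.isPrefixOf]
lemma pvEw1 (l : List Char) (c x : Char) :
    PySem.Chars.endswith (l ++ [c]) [x] = (x == c) := by
  simp [PySem.Chars.endswith, List.isSuffixOf, List.isPrefixOf]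

lemma hsorted : (PySem.List.sorted pvUnitsA.items (fun x => PySem.Str.len x.1) true)
    = [("Ki", 1024), ("Mi", 1024^2), ("Gi", 1024^3), ("Ti", 1024^4), ("Pi", 1024^5),
      ("K", 1000), ("M", 1000^2), ("G", 1000^3), ("T", 1000^4), ("P", 1000^5)] := by decide
lemma hB : pvUnitsB = PySem.Dict.mk [("Ki", 1024), ("Mi", 1024^2), ("Gi", 1024^3), ("Ti", 1024^4), ("Pi", 1024^5),
    ("K", 1000), ("M", 1000^2), ("G", 1000^3), ("T", 1000^4), ("P", 1000^5)] := by decide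

lemma ofList_ne_empty (l : List Char) (h : l ≠ []) : String.ofList l ≠ "" := by
  intro he
  have := congrArg String.toList he
  simp at this
  exact h this

set_option maxHeartbeats 2000000 in
theorem core1 (c : Char) : parse_storage_quantity (String.ofList [c]) = parse_storage_quantity_alt (String.ofList [c]) := by
  have hne : String.ofList [c] ≠ "" := ofList_ne_empty _ (by simp)
  unfold parse_storage_quantity parse_storage_quantity_alt
  rw [hsorted, hB]
  simp only [pvLoopA, if_neg hne]
  have h1 : ∀ s : String, PySem.Int.ofStr? s = PySem.Int.ofChars? s.toList := by
    intro s; rw [← PySem.Int.ofStr?_ofList, String.ofList_toList]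
  simp only [PySem.Str.endswith_eq, h1, PySem.Str.toList_slice, String.toList_ofList,
    PySem.Dict.get?_mk_cons]
  have e2 : ("Ki" : String).toList = ['K','i'] ∧ ("Mi" : String).toList = ['M','i'] ∧ ("Gi" : String).toList = ['G','i']
      ∧ ("Ti" : String).toList = ['T','i'] ∧ ("Pi" : String).toList = ['P','i'] ∧ ("K" : String).toList = ['K']
      ∧ ("M" : String).toList = ['M'] ∧ ("G" : String).toList = ['G'] ∧ ("T" : String).toList = ['T']
      ∧ ("P" : String).toList = ['P'] := by decide
  obtain ⟨k1,k2,k3,k4,k5,k6,k7,k8,k9,k10⟩ := e2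
  have lens : PySem.Str.len "Ki" = 2 ∧ PySem.Str.len "Mi" = 2 ∧ PySem.Str.len "Gi" = 2 ∧ PySem.Str.len "Ti" = 2
      ∧ PySem.Str.len "Pi" = 2 ∧ PySem.Str.len "K" = 1 ∧ PySem.Str.len "M" = 1 ∧ PySem.Str.len "G" = 1
      ∧ PySem.Str.len "T" = 1 ∧ PySem.Str.len "P" = 1 := by decide
  obtain ⟨n1,n2,n3,n4,n5,n6,n7,n8,n9,n10⟩ := lens
  simp only [k1,k2,k3,k4,k5,k6,k7,k8,k9,k10,n1,n2,n3,n4,n5,n6,n7,n8,n9,n10]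
  have hc : ∀ x : Char, PySem.Chars.endswith [c] [x] = (x == c) := fun x => pvEw1 [] c x
  have hsb : ∀ (x y : String), (x == y) = (x.toList == y.toList) := by
    intro x y
    simp [String.toList_inj]
  simp only [pvEw2s, hc, Bool.false_eq_true, if_false, hsb, PySem.Str.toList_slice,
    String.toList_ofList, k1,k2,k3,k4,k5,k6,k7,k8,k9,k10]
  have s1 : PySem.Chars.slice [c] (some (-2)) none = [c] := by simp [pysem]
  have s2 : PySem.Chars.slice [c] (some (-1)) none = [c] := by simp [pysem]
  have s3 : PySem.Chars.slice [c] none (some (-2)) = ([] : List Char) := by simp [pysem]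
  have s4 : PySem.Chars.slice [c] none (some (-1)) = ([] : List Char) := by simp [pysem]
  simp only [s1, s2, s4]
  have hof : PySem.Int.ofChars? [] = none := by decide
  simp only [hof, List.cons.injEq, List.cons_ne_nil, and_false, beq_iff_eq, and_true]
  split_ifs <;> simp_all [PySem.Dict.get?]

set_option maxHeartbeats 4000000 in
theorem core2 (l : List Char) (b c : Char) :
    parse_storage_quantity (String.ofList (l ++ [b, c])) = parse_storage_quantity_alt (String.ofList (l ++ [b, c])) := by
  have hne : String.ofList (l ++ [b, c]) ≠ "" := ofList_ne_empty _ (by simp)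
  unfold parse_storage_quantity parse_storage_quantity_alt
  rw [hsorted, hB]
  simp only [pvLoopA, if_neg hne]
  have h1 : ∀ s : String, PySem.Int.ofStr? s = PySem.Int.ofChars? s.toList := by
    intro s; rw [← PySem.Int.ofStr?_ofList, String.ofList_toList]
  simp only [PySem.Str.endswith_eq, h1, PySem.Str.toList_slice, String.toList_ofList,
    PySem.Dict.get?_mk_cons]
  have e2 : ("Ki" : String).toList = ['K','i'] ∧ ("Mi" : String).toList = ['M','i'] ∧ ("Gi" : String).toList = ['G','i']
      ∧ ("Ti" : String).toList = ['T','i'] ∧ ("Pi" : String).toList = ['P','i'] ∧ ("K" : String).toList = ['K']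
      ∧ ("M" : String).toList = ['M'] ∧ ("G" : String).toList = ['G'] ∧ ("T" : String).toList = ['T']
      ∧ ("P" : String).toList = ['P'] := by decide
  obtain ⟨k1,k2,k3,k4,k5,k6,k7,k8,k9,k10⟩ := e2
  have lens : PySem.Str.len "Ki" = 2 ∧ PySem.Str.len "Mi" = 2 ∧ PySem.Str.len "Gi" = 2 ∧ PySem.Str.len "Ti" = 2
      ∧ PySem.Str.len "Pi" = 2 ∧ PySem.Str.len "K" = 1 ∧ PySem.Str.len "M" = 1 ∧ PySem.Str.len "G" = 1
      ∧ PySem.Str.len "T" = 1 ∧ PySem.Str.len "P" = 1 := by decide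
  obtain ⟨n1,n2,n3,n4,n5,n6,n7,n8,n9,n10⟩ := lens
  simp only [k1,k2,k3,k4,k5,k6,k7,k8,k9,k10,n1,n2,n3,n4,n5,n6,n7,n8,n9,n10]
  have hc1 : ∀ x : Char, PySem.Chars.endswith (l ++ [b, c]) [x] = (x == c) := by
    intro x
    rw [show l ++ [b, c] = (l ++ [b]) ++ [c] by simp]
    exact pvEw1 _ _ _
  have hsb : ∀ (x y : String), (x == y) = (x.toList == y.toList) := by
    intro x y
    simp [String.toList_inj]
  simp only [pvEw2, hc1, hsb, PySem.Str.toList_slice, String.toList_ofList,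
    k1,k2,k3,k4,k5,k6,k7,k8,k9,k10]
  have s1 : PySem.Chars.slice (l ++ [b, c]) (some (-2)) none = [b, c] := by simp [pysem]
  have s2 : PySem.Chars.slice (l ++ [b, c]) (some (-1)) none = [c] := by simp [pysem]
  have s3 : PySem.Chars.slice (l ++ [b, c]) none (some (-2)) = l := by simp [pysem]
  have s4 : PySem.Chars.slice (l ++ [b, c]) none (some (-1)) = l ++ [b] := by simp [pysem]
  simp only [s1, s2, s3, s4, PySem.Dict.get?]
  have bnil1 : ∀ (x : Char) (xs : List Char), ((x::xs : List Char) == []) = false := by intro x xs; rfl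
  have bnil2 : ∀ (x : Char) (xs : List Char), (([] : List Char) == x::xs) = false := by intro x xs; rfl
  have bnn : (([] : List Char) == []) = true := rfl
  simp only [List.cons_beq_cons, bnil1, bnil2, bnn, Bool.and_true, Bool.and_false,
    Bool.false_eq_true, if_false]
  simp only [List.find?_nil, Option.map_none]
  clear hne h1 k1 k2 k3 k4 k5 k6 k7 k8 k9 k10 n1 n2 n3 n4 n5 n6 n7 n8 n9 n10 hc1 hsb bnil1 bnil2 bnn
  split_ifs with q1 q2 q3 q4 q5 q6 q7 q8 q9 q10 <;>
    simp_all only [beq_iff_eq, Bool.and_eq_true] <;> simp_all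

theorem core0 : parse_storage_quantity (String.ofList []) = parse_storage_quantity_alt (String.ofList []) := by
  decide

theorem core (l : List Char) : parse_storage_quantity (String.ofList l) = parse_storage_quantity_alt (String.ofList l) := by
  induction l using List.reverseRecOn with
  | nil => exact core0
  | append_singleton l' c _ =>
    cases l' using List.reverseRecOn with
    | nil => exact core1 c
    | append_singleton l'' b _ =>
      rw [show (l'' ++ [b]) ++ [c] = l'' ++ [b, c] by simp]
      exact core2 l'' b c

-- ===== VERDICT (by name: the statement is the Claim_ definition above) =====
theorem parse_storage_quantity_spec : Claim_equal_parse_storage_quantity := by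
  intro q _
  unfold Spec_parse_storage_quantity
  have h := core q.toList
  rwa [String.ofList_toList] at h
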